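-- pv_equiv track=rewrite | github.com/aleksandervestlund/data-mining | source/finding_similar_items/min_hash.py | generate_signature_matrix
-- ===== SOURCE A (Python) =====
-- from collections.abc import Iterable, Sequence
--
-- def generate_signature_matrix(
--     permutations: Sequence[Sequence[int]],
--     shingles_matrix: Sequence[Sequence[bool]],
-- ) -> list[list[int]]:
--     num_hashes = len(permutations)
--     num_docs = len(shingles_matrix[0])
--     signature_matrix = [[num_hashes] * num_docs for _ in range(num_hashes)]
--
--     for hash_idx, permutation in enumerate(permutations):
--         for row_idx, shingle in enumerate(shingles_matrix):
--             for doc_idx in range(num_docs):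
--                 if not shingle[doc_idx]:
--                     continue
--
--                 signature_matrix[hash_idx][doc_idx] = min(
--                     signature_matrix[hash_idx][doc_idx], permutation[row_idx]
--                 )
--
--     return signature_matrix
-- ===== SOURCE B (Python) =====
-- def generate_signature_matrix(permutations, shingles_matrix):
--     num_hashes = len(permutations)
--     # Transpose once: for each document (column), the indices of the shingle rows it contains.
--     doc_rows = [[r for r, flag in enumerate(column) if flag]
--                 for column in zip(*shingles_matrix)]
--     # Each cell is a direct min-reduction over that document's rows, seeded with the sentinel.
--     return [[min([num_hashes] + [perm[r] for r in rows]) for rows in doc_rows]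
--             for perm in permutations]
-- ===== Notes on version B (the rewrite author's own statement) =====
-- stated objective: faster
-- what changed: B transposes the shingle matrix once into per-document lists of containing-row indices and computes each signature cell as an independent min-reduction over that list, replacing A's triple-nested in-place min-update sweep over every (hash,row,doc) triple.
import Mathlib
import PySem

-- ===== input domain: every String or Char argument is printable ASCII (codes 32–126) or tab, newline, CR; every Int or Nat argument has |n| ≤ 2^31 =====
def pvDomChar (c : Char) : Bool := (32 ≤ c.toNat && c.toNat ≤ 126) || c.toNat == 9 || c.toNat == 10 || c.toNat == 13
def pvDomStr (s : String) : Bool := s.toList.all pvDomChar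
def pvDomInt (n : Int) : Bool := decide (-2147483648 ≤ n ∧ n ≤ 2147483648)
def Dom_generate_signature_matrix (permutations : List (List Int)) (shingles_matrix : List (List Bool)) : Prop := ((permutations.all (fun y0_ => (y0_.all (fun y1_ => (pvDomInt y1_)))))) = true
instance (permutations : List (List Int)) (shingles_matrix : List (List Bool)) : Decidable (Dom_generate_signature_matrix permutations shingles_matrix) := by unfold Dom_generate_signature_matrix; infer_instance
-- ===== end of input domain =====

set_option maxRecDepth 10000


-- B transposes the shingle matrix once into per-document row-index lists and computes each
-- signature cell as an independent min-reduction, instead of A's in-place min-update sweep.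

-- ===== PORT A =====
def generate_signature_matrix (permutations : List (List Int)) (shingles_matrix : List (List Bool)) : List (List Int) :=
  let num_hashes : Int := permutations.length
  let num_docs : Nat := (PySem.List.pyGetD shingles_matrix 0 []).length  -- len(shingles_matrix[0]); IndexError on [] is excluded by Pre_
  let signature_matrix : List (List Int) :=
    (List.range permutations.length).map (fun _ => List.replicate num_docs num_hashes)
  (PySem.List.enumerate permutations).foldl (fun sig hp =>
    (PySem.List.enumerate shingles_matrix).foldl (fun sig rs =>
      (PySem.List.pyRange 0 (num_docs : Int)).foldl (fun sig d =>
        if PySem.List.pyGetD rs.2 d false then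
          PySem.List.pySetD sig hp.1
            (PySem.List.pySetD (PySem.List.pyGetD sig hp.1 []) d
              (min (PySem.List.pyGetD (PySem.List.pyGetD sig hp.1 []) d 0)
                   (PySem.List.pyGetD hp.2 rs.1 0)))
        else sig) sig) sig) signature_matrix

-- ===== PORT B =====
-- zip(*rows): columns truncated to the shortest row, exact as in Python (the getD default is
-- never consulted: every index is below every row's length).
def pvZipCols (rows : List (List Bool)) : List (List Bool) :=
  match rows with
  | [] => []
  | r :: rs =>
    (List.range (rs.foldl (fun acc l => Nat.min acc l.length) r.length)).map
      (fun d => (r :: rs).map (fun row => row.getD d false))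

def generate_signature_matrix_alt (permutations : List (List Int)) (shingles_matrix : List (List Bool)) : List (List Int) :=
  let num_hashes : Int := permutations.length
  let doc_rows : List (List Int) :=
    (pvZipCols shingles_matrix).map (fun column =>
      (PySem.List.enumerate column).filterMap (fun rf => if rf.2 then some rf.1 else none))
  permutations.map (fun perm =>
    doc_rows.map (fun rows =>
      (rows.map (fun r => PySem.List.pyGetD perm r 0)).foldl min num_hashes))

-- ===== PRECONDITION & SPEC =====
-- Pre_ excludes exactly the inputs on which Python A raises IndexError: an empty
-- shingles_matrix, or (when at least one permutation is given) a shingle row shorter than the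
-- first row, or a shingle row with a True entry whose row index reaches past some permutation.
def Pre_generate_signature_matrix (permutations : List (List Int)) (shingles_matrix : List (List Bool)) : Prop :=
  shingles_matrix ≠ [] ∧
  (permutations = [] ∨
    ((∀ row ∈ shingles_matrix, (shingles_matrix.headD []).length ≤ row.length) ∧
     (∀ rp ∈ shingles_matrix.zipIdx,
        ((rp.1.take (shingles_matrix.headD []).length).any id) = true →
        ∀ p ∈ permutations, rp.2 < p.length)))
instance (permutations : List (List Int)) (shingles_matrix : List (List Bool)) : Decidable (Pre_generate_signature_matrix permutations shingles_matrix) := by unfold Pre_generate_signature_matrix; infer_instance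

def pvWitness_generate_signature_matrix : List (List Int) × List (List Bool) :=
  ([[1, 2], [3, 4]], [[true, false], [false, true]])

def Spec_generate_signature_matrix (permutations : List (List Int)) (shingles_matrix : List (List Bool)) (out : List (List Int)) : Prop := out = generate_signature_matrix_alt permutations shingles_matrix
instance (permutations : List (List Int)) (shingles_matrix : List (List Bool)) (out : List (List Int)) : Decidable (Spec_generate_signature_matrix permutations shingles_matrix out) := by unfold Spec_generate_signature_matrix; infer_instance

-- ===== CLAIM (what is proved, stated in full; the proofs are below) =====
def Claim_equal_generate_signature_matrix : Prop := ∀ (permutations : List (List Int)) (shingles_matrix : List (List Bool)), Dom_generate_signature_matrix permutations shingles_matrix → Pre_generate_signature_matrix permutations shingles_matrix → Spec_generate_signature_matrix permutations shingles_matrix (generate_signature_matrix permutations shingles_matrix)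

-- ===== LEMMAS AND PROOFS =====

-- The per-hash row computation port A factors through: for each (index, shingle-row), scan
-- docs 0..D-1 and min-update the True positions.
def pvRowA (D : Nat) (p : List Int) (sm : List (List Bool)) (s : Int) (row : List Int) : List Int :=
  (PySem.List.enumerate sm s).foldl (fun row rs =>
    (List.range D).foldl (fun row k =>
      if rs.2.getD k false then row.set k (min (row.getD k 0) (PySem.List.pyGetD p rs.1 0)) else row) row) row

-- The per-cell value both sides compute: fold over the shingle rows, taking a min when the
-- row contains document d.
def pvCell (p : List Int) : List (List Bool) → Int → Nat → Int → Int
  | [], _, _, v => v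
  | r :: rest, s, d, v =>
      pvCell p rest (s + 1) d (if r.getD d false then min v (PySem.List.pyGetD p s 0) else v)

theorem pv_set_getD_self {α : Type} (l : List α) (h : Nat) (d : α) (hh : h < l.length) :
    l.set h (l.getD h d) = l := by
  rw [List.getD_eq_getElem l d hh]
  exact List.set_getElem_self hh

theorem pv_foldl_length {α : Type} (f : List Int → α → List Int)
    (hf : ∀ r a, (f r a).length = r.length) :
    ∀ (l : List α) (r : List Int), (l.foldl f r).length = r.length := by
  intro l
  induction l with
  | nil => intro r; rfl
  | cons a l ih => intro r; rw [List.foldl_cons, ih (f r a), hf]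

-- Updates that only touch row h of the matrix factor through List.set h.
theorem pv_inner_set (c : Nat → Bool) (v : Int) :
    ∀ (l : List Nat) (sig : List (List Int)) (h : Nat), h < sig.length →
    l.foldl (fun sig d =>
        if c d then sig.set h ((sig.getD h []).set d (min ((sig.getD h []).getD d 0) v)) else sig) sig
      = sig.set h (l.foldl (fun row d =>
          if c d then row.set d (min (row.getD d 0) v) else row) (sig.getD h [])) := by
  intro l
  induction l with
  | nil =>
    intro sig h hh
    exact (pv_set_getD_self sig h [] hh).symm
  | cons k l ih =>
    intro sig h hh
    by_cases hc : c k
    · simp only [List.foldl_cons, hc, if_true]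
      have hh' : h < (sig.set h ((sig.getD h []).set k (min ((sig.getD h []).getD k 0) v))).length := by
        simpa using hh
      rw [ih _ h hh', List.set_set]
      have hget : (sig.set h ((sig.getD h []).set k (min ((sig.getD h []).getD k 0) v))).getD h []
          = (sig.getD h []).set k (min ((sig.getD h []).getD k 0) v) := by
        rw [List.getD_eq_getElem _ _ hh']
        exact List.getElem_set_self hh'
      rw [hget]
    · simpa only [List.foldl_cons, hc, Bool.false_eq_true, if_false] using ih sig h hh

theorem pvRowA_nil (D : Nat) (p : List Int) (s : Int) (row : List Int) :
    pvRowA D p [] s row = row := by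
  simp [pvRowA, PySem.List.enumerate_nil]

theorem pvRowA_cons (D : Nat) (p : List Int) (sh : List Bool) (sm : List (List Bool))
    (s : Int) (row : List Int) :
    pvRowA D p (sh :: sm) s row
      = pvRowA D p sm (s + 1) ((List.range D).foldl (fun row k =>
          if sh.getD k false then row.set k (min (row.getD k 0) (PySem.List.pyGetD p s 0)) else row) row) := by
  simp [pvRowA, PySem.List.enumerate_cons]

theorem pv_mat_row (D : Nat) (p : List Int) :
    ∀ (sm : List (List Bool)) (s : Int) (sig : List (List Int)) (h : Nat), h < sig.length →
    (PySem.List.enumerate sm s).foldl (fun sig rs =>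
        (List.range D).foldl (fun sig k =>
          if rs.2.getD k false then
            sig.set h ((sig.getD h []).set k
              (min ((sig.getD h []).getD k 0) (PySem.List.pyGetD p rs.1 0)))
          else sig) sig) sig
      = sig.set h (pvRowA D p sm s (sig.getD h [])) := by
  intro sm
  induction sm with
  | nil =>
    intro s sig h hh
    rw [PySem.List.enumerate_nil, List.foldl_nil, pvRowA_nil]
    exact (pv_set_getD_self sig h [] hh).symm
  | cons sh sm ih =>
    intro s sig h hh
    simp only [PySem.List.enumerate_cons, List.foldl_cons]
    rw [pv_inner_set (fun k => sh.getD k false) (PySem.List.pyGetD p s 0) (List.range D) sig h hh]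
    have hh' : h < (sig.set h ((List.range D).foldl (fun row k =>
        if sh.getD k false then row.set k (min (row.getD k 0) (PySem.List.pyGetD p s 0)) else row)
        (sig.getD h []))).length := by simpa using hh
    rw [ih (s + 1) _ h hh', List.set_set, pvRowA_cons]
    have hget : (sig.set h ((List.range D).foldl (fun row k =>
        if sh.getD k false then row.set k (min (row.getD k 0) (PySem.List.pyGetD p s 0)) else row)
        (sig.getD h []))).getD h []
        = (List.range D).foldl (fun row k =>
          if sh.getD k false then row.set k (min (row.getD k 0) (PySem.List.pyGetD p s 0)) else row)
          (sig.getD h []) := by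
      rw [List.getD_eq_getElem _ _ hh']
      exact List.getElem_set_self hh'
    rw [hget]

-- One outer step of port A, with the hash index instantiated, rewrites to a row update.
theorem pv_step1 (D : Nat) (sm : List (List Bool)) (p : List Int)
    (pre : List (List Int)) (row : List Int) (rest : List (List Int)) :
    (PySem.List.enumerate sm).foldl (fun sig rs =>
      (PySem.List.pyRange 0 (D : Int)).foldl (fun sig d =>
        if PySem.List.pyGetD rs.2 d false then
          PySem.List.pySetD sig ((pre.length : Nat) : Int)
            (PySem.List.pySetD (PySem.List.pyGetD sig ((pre.length : Nat) : Int) []) d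
              (min (PySem.List.pyGetD (PySem.List.pyGetD sig ((pre.length : Nat) : Int) []) d 0)
                   (PySem.List.pyGetD p rs.1 0)))
        else sig) sig) (pre ++ row :: rest)
      = pre ++ pvRowA D p sm 0 row :: rest := by
  have h1 : pre.length < (pre ++ row :: rest).length := by simp
  simp only [PySem.List.pyRange_one, sub_zero, Int.toNat_natCast, zero_add, List.foldl_map,
    PySem.List.pyGetD_natCast, PySem.List.pySetD_natCast]
  rw [pv_mat_row D p sm 0 _ _ h1]
  have hget : (pre ++ row :: rest).getD pre.length [] = row := by
    rw [List.getD_eq_getElem _ _ h1]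
    simp [List.getElem_append_right]
  rw [hget, List.set_append]
  simp

theorem pv_outer (D : Nat) (sm : List (List Bool)) :
    ∀ (ps : List (List Int)) (pre rest : List (List Int)), rest.length = ps.length →
    (PySem.List.enumerate ps ((pre.length : Nat) : Int)).foldl (fun sig hp =>
      (PySem.List.enumerate sm).foldl (fun sig rs =>
        (PySem.List.pyRange 0 (D : Int)).foldl (fun sig d =>
          if PySem.List.pyGetD rs.2 d false then
            PySem.List.pySetD sig hp.1
              (PySem.List.pySetD (PySem.List.pyGetD sig hp.1 []) d
                (min (PySem.List.pyGetD (PySem.List.pyGetD sig hp.1 []) d 0)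
                     (PySem.List.pyGetD hp.2 rs.1 0)))
          else sig) sig) sig) (pre ++ rest)
      = pre ++ List.zipWith (fun p row => pvRowA D p sm 0 row) ps rest := by
  intro ps
  induction ps with
  | nil =>
    intro pre rest hlen
    have hrest : rest = [] := List.eq_nil_of_length_eq_zero hlen
    subst hrest
    rw [PySem.List.enumerate_nil, List.foldl_nil]
    rfl
  | cons p ps ih =>
    intro pre rest hlen
    cases rest with
    | nil => simp at hlen
    | cons row rest' =>
      simp only [PySem.List.enumerate_cons, List.foldl_cons]
      rw [pv_step1 D sm p pre row rest']
      have hlen' : rest'.length = ps.length := by simpa using hlen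
      have e1 : pre ++ pvRowA D p sm 0 row :: rest' = (pre ++ [pvRowA D p sm 0 row]) ++ rest' := by
        simp
      have e2 : ((pre.length : Nat) : Int) + 1 = (((pre ++ [pvRowA D p sm 0 row]).length : Nat) : Int) := by
        simp
      have e3 : pre ++ List.zipWith (fun p row => pvRowA D p sm 0 row) (p :: ps) (row :: rest')
          = (pre ++ [pvRowA D p sm 0 row]) ++ List.zipWith (fun p row => pvRowA D p sm 0 row) ps rest' := by
        simp
      rw [e1, e2, e3]
      exact ih (pre ++ [pvRowA D p sm 0 row]) rest' hlen'

theorem pv_zipWith_replicate (f : List Int → List Int → List Int) (c : List Int) :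
    ∀ (ps : List (List Int)) (n : Nat), n = ps.length →
    List.zipWith f ps (List.replicate n c) = ps.map (fun p => f p c) := by
  intro ps
  induction ps with
  | nil => intro n h; subst h; rfl
  | cons p ps ih =>
    intro n h
    cases n with
    | zero => simp at h
    | succ m =>
      have hm : m = ps.length := by simpa using h
      simp [List.replicate_succ, ih m hm]

-- One min-update scan over range D, read at position d.
theorem pv_inner_get (c : Nat → Bool) (v : Int) :
    ∀ (l : List Nat) (row : List Int) (d : Nat), d < row.length →
    (l.foldl (fun row k => if c k then row.set k (min (row.getD k 0) v) else row) row).getD d 0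
      = if d ∈ l ∧ c d then min (row.getD d 0) v else row.getD d 0 := by
  intro l
  induction l with
  | nil => intro row d hd; simp
  | cons k l ih =>
    intro row d hd
    rw [List.foldl_cons]
    have hlen : (if c k then row.set k (min (row.getD k 0) v) else row).length = row.length := by
      split <;> simp
    have hd' : d < (if c k then row.set k (min (row.getD k 0) v) else row).length := by
      rw [hlen]; exact hd
    rw [ih _ d hd']
    have hrow' : (if c k then row.set k (min (row.getD k 0) v) else row).getD d 0
        = if k = d ∧ c d then min (row.getD d 0) v else row.getD d 0 := by
      by_cases hc : c k
      · simp only [hc, if_true]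
        rw [List.getD_eq_getElem _ _ (by simpa using hd), List.getElem_set]
        by_cases hkd : k = d
        · subst hkd
          simp [hc]
        · simp [hkd, List.getElem?_eq_getElem hd]
      · simp only [hc]
        by_cases hkd : k = d
        · subst hkd; simp [hc]
        · simp [hkd]
    rw [hrow']
    by_cases hcd : c d
    · by_cases hkd : k = d
      · subst hkd
        by_cases hmem : k ∈ l <;> simp [hcd, hmem] <;> simp [min_assoc]
      · have hdk : ¬d = k := fun h => hkd h.symm
        by_cases hmem : d ∈ l <;> simp [hcd, hkd, hdk, hmem]
    · simp [hcd]

theorem pvRowA_length (D : Nat) (p : List Int) :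
    ∀ (sm : List (List Bool)) (s : Int) (row : List Int), (pvRowA D p sm s row).length = row.length := by
  intro sm
  induction sm with
  | nil => intro s row; rw [pvRowA_nil]
  | cons sh sm ih =>
    intro s row
    rw [pvRowA_cons, ih]
    exact pv_foldl_length _ (fun r a => by split <;> simp) _ _

theorem pvRowA_get (D : Nat) (p : List Int) :
    ∀ (sm : List (List Bool)) (s : Int) (row : List Int), row.length = D →
    ∀ d, d < D →
    (pvRowA D p sm s row).getD d 0 = pvCell p sm s d (row.getD d 0) := by
  intro sm
  induction sm with
  | nil => intro s row _ d _; rw [pvRowA_nil]; rfl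
  | cons sh sm ih =>
    intro s row hlen d hd
    rw [pvRowA_cons]
    have hlen' : ((List.range D).foldl (fun row k =>
        if sh.getD k false then row.set k (min (row.getD k 0) (PySem.List.pyGetD p s 0)) else row) row).length = D := by
      rw [pv_foldl_length _ (fun r a => by split <;> simp), hlen]
    rw [ih (s + 1) _ hlen' d hd]
    have hget := pv_inner_get (fun k => sh.getD k false) (PySem.List.pyGetD p s 0)
      (List.range D) row d (by rw [hlen]; exact hd)
    simp only [List.mem_range, hd, true_and] at hget
    rw [show pvCell p (sh :: sm) s d (row.getD d 0)
        = pvCell p sm (s + 1) d (if sh.getD d false then min (row.getD d 0) (PySem.List.pyGetD p s 0) else row.getD d 0) from rfl]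
    rw [hget]

theorem pvRowA_replicate (D : Nat) (p : List Int) (sm : List (List Bool)) (H : Int) :
    pvRowA D p sm 0 (List.replicate D H) = (List.range D).map (fun d => pvCell p sm 0 d H) := by
  apply List.ext_getElem
  · rw [pvRowA_length]; simp
  · intro d h1 h2
    have hd : d < D := by simpa using h2
    have := pvRowA_get D p sm 0 (List.replicate D H) (by simp) d hd
    rw [List.getD_eq_getElem _ _ h1] at this
    rw [this]
    simp [hd]

theorem pv_foldl_min_eq : ∀ (rs : List (List Bool)) (a : Nat), (∀ x ∈ rs, a ≤ x.length) →
    rs.foldl (fun acc l => Nat.min acc l.length) a = a := by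
  intro rs
  induction rs with
  | nil => intro a _; rfl
  | cons r rs ih =>
    intro a h
    rw [List.foldl_cons]
    have h1 : a ≤ r.length := h r (List.mem_cons_self)
    have : Nat.min a r.length = a := Nat.min_eq_left h1
    rw [this]
    exact ih a (fun x hx => h x (List.mem_cons_of_mem _ hx))

theorem pvZipCols_cons (r0 : List Bool) (rs : List (List Bool)) :
    pvZipCols (r0 :: rs)
      = (List.range (rs.foldl (fun acc l => Nat.min acc l.length) r0.length)).map
          (fun d => (r0 :: rs).map (fun row => row.getD d false)) := rfl

theorem pvZipCols_eq (r0 : List Bool) (rs : List (List Bool))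
    (h : ∀ row ∈ (r0 :: rs), r0.length ≤ row.length) :
    pvZipCols (r0 :: rs)
      = (List.range r0.length).map (fun d => (r0 :: rs).map (fun row => row.getD d false)) := by
  rw [pvZipCols_cons,
    pv_foldl_min_eq rs r0.length (fun x hx => h x (List.mem_cons_of_mem _ hx))]

-- B's min-reduction over the true indices of column d equals the common cell fold.
theorem pv_colfold (p : List Int) (d : Nat) :
    ∀ (sm : List (List Bool)) (s : Int) (v : Int),
    (((PySem.List.enumerate (sm.map (fun row => row.getD d false)) s).filterMap
        (fun rf => if rf.2 then some rf.1 else none)).map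
      (fun r => PySem.List.pyGetD p r 0)).foldl min v
      = pvCell p sm s d v := by
  intro sm
  induction sm with
  | nil => intro s v; simp [PySem.List.enumerate_nil, pvCell]
  | cons r rest ih =>
    intro s v
    rw [List.map_cons, PySem.List.enumerate_cons, List.filterMap_cons]
    by_cases hr : r.getD d false
    · have hr' : r[d]?.getD false = true := hr
      simp only [hr, if_true, List.map_cons, List.foldl_cons]
      rw [ih (s + 1) (min v (PySem.List.pyGetD p s 0))]
      simp [pvCell, hr']
    · have hr' : ¬r[d]?.getD false = true := hr
      simp only [hr, Bool.false_eq_true, if_false]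
      rw [ih (s + 1) v]
      simp [pvCell, hr']

-- ===== VERDICT (by name: the statement is the Claim_ definition above) =====
theorem generate_signature_matrix_spec : Claim_equal_generate_signature_matrix := by
  intro ps sm hdom hpre
  unfold Spec_generate_signature_matrix
  obtain ⟨hne, hrest⟩ := hpre
  cases sm with
  | nil => exact absurd rfl hne
  | cons r0 rs =>
    rcases hrest with hps | ⟨hlen, _⟩
    · subst hps
      simp [generate_signature_matrix, generate_signature_matrix_alt, PySem.List.enumerate_nil]
    · simp only [generate_signature_matrix, generate_signature_matrix_alt,
        PySem.List.pyGetD_zero_cons]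
      have hA := pv_outer r0.length (r0 :: rs) ps []
        (List.replicate ps.length (List.replicate r0.length (ps.length : Int))) (by simp)
      simp only [List.length_nil, Nat.cast_zero, List.nil_append] at hA
      have hmap : (List.range ps.length).map
          (fun _ => List.replicate r0.length ((ps.length : Nat) : Int))
          = List.replicate ps.length (List.replicate r0.length (ps.length : Int)) := by
        simp
      rw [hmap, hA, pv_zipWith_replicate _ _ ps ps.length rfl]
      have hlen' : ∀ row ∈ (r0 :: rs), r0.length ≤ row.length := by
        simpa using hlen
      rw [pvZipCols_eq r0 rs hlen', List.map_map]
      refine List.map_congr_left ?_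
      intro p hp
      rw [pvRowA_replicate, List.map_map]
      refine List.map_congr_left ?_
      intro d hd
      exact (pv_colfold p d (r0 :: rs) 0 (ps.length : Int)).symm
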